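-- pv_equiv track=rewrite | github.com/subhash011/cnlab-sem7 | lab11/q1.py | generate_rsa
-- ===== SOURCE A (Python) =====
-- from math import gcd
--
-- def extended_gcd(a, b):
--     """
--     This is an extended euclidean algorithm.
--     For more information, see https://en.wikipedia.org/wiki/Extended_Euclidean_algorithm
--     """
--     old_r, r = a, b
--     old_s, s = 1, 0
--     old_t, t = 0, 1
--     while r != 0:
--         quotient = old_r // r
--         old_r, r = r, old_r - quotient * r
--         old_s, s = s, old_s - quotient * s
--         old_t, t = t, old_t - quotient * t
--     return old_r, old_s, old_t
--
-- def modular_inverse(a, m):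
--     """
--     Calculates the modular inverse of a modulo m.
--     """
--     g, x, _ = extended_gcd(a, m)
--     if g != 1:
--         return None
--     return x % m
--
-- def generate_rsa(p, q):
--     """
--     Generates a key pair, given two primes p and q.
--     Note:
--     """
--     # the modulus n is the product of p and q
--     n = p * q
--     # the totient of n is (p-1)*(q-1)
--     totient = (p - 1) * (q - 1)
--     # the public exponent (used in encryption)
--     e = 5
--     while e < totient:
--         # find a "e" that is relatively prime to z
--         if gcd(e, totient) == 1:
--             break
--         e += 1
--     # d is the secret exponent (used in decryption)
--     d = modular_inverse(e, totient)
--     return n, e, d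
-- ===== SOURCE B (Python) =====
-- from math import gcd
--
-- def egcd(a, b):
--     # classic recursive extended Euclid
--     if b == 0:
--         return a, 1, 0
--     g, x, y = egcd(b, a % b)
--     return g, y, x - (a // b) * y
--
-- def generate_rsa(p, q):
--     n = p * q
--     totient = (p - 1) * (q - 1)
--     e = 5
--     while e < totient and gcd(e, totient) != 1:
--         e += 1
--     g, x, _ = egcd(e, totient)
--     d = x % totient if g == 1 else None
--     return n, e, d
-- ===== Notes on version B (the rewrite author's own statement) =====
-- stated objective: alternative
-- what changed: The six-variable iterative extended-gcd loop is replaced by the classic three-line recursive egcd (and the separate modular_inverse helper is inlined as a conditional on its gcd), with the e-search loop condition folded into one while test.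
import Mathlib
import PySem

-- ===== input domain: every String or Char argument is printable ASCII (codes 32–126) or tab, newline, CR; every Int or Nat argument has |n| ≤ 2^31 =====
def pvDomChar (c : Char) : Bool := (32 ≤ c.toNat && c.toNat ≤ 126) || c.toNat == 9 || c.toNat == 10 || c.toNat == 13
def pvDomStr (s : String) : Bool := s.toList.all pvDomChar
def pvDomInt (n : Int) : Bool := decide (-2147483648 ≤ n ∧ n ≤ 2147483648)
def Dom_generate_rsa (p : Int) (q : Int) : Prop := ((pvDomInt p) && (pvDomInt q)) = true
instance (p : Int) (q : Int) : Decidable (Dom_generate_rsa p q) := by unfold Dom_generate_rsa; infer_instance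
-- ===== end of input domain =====

-- B replaces A's six-variable iterative extended gcd by the classic recursive egcd and
-- inlines modular_inverse; objective: alternative (same cost, different decomposition).

-- ===== PORT A =====
-- the while-loop of extended_gcd, state (old_r, r, old_s, s, old_t, t)
def extGcdLoop (old_r r old_s s old_t t : Int) : Int × Int × Int :=
  if h : r = 0 then (old_r, old_s, old_t)
  else
    let quotient := PySem.Int.floordiv old_r r
    extGcdLoop r (old_r - quotient * r) s (old_s - quotient * s) t (old_t - quotient * t)
termination_by r.natAbs
decreasing_by
  have hm := PySem.Int.floordiv_mul_add_mod old_r r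
  have : old_r - PySem.Int.floordiv old_r r * r = PySem.Int.mod old_r r := by omega
  rw [this]
  rcases lt_trichotomy r 0 with hr | hr | hr
  · have hb := PySem.Int.mod_neg_bounds old_r hr; omega
  · exact absurd hr h
  · have h1 := PySem.Int.mod_nonneg old_r hr
    have h2 := PySem.Int.mod_lt old_r hr
    omega

def extended_gcd (a b : Int) : Int × Int × Int :=
  extGcdLoop a b 1 0 0 1

def modular_inverse (a m : Int) : Option Int :=
  let (g, x, _) := extended_gcd a m
  if g ≠ 1 then none
  else some (PySem.Int.mod x m)

-- the e-search while-loop of generate_rsa (e, break on gcd == 1)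
def findE (totient e : Int) : Int :=
  if h : e < totient then
    if Int.gcd e totient = 1 then e
    else findE totient (e + 1)
  else e
termination_by (totient - e).toNat
decreasing_by omega

def generate_rsa (p : Int) (q : Int) : Int × Int × Option Int :=
  let n := p * q
  let totient := (p - 1) * (q - 1)
  let e := findE totient 5
  let d := modular_inverse e totient
  (n, e, d)

-- ===== PORT B =====
-- classic recursive extended Euclid
def egcd (a b : Int) : Int × Int × Int :=
  if h : b = 0 then (a, 1, 0)
  else
    let r := egcd b (PySem.Int.mod a b)
    (r.1, r.2.2, r.2.1 - PySem.Int.floordiv a b * r.2.2)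
termination_by b.natAbs
decreasing_by
  rcases lt_trichotomy b 0 with hb | hb | hb
  · have := PySem.Int.mod_neg_bounds a hb; omega
  · exact absurd hb h
  · have h1 := PySem.Int.mod_nonneg a hb
    have h2 := PySem.Int.mod_lt a hb
    omega

-- the e-search while-loop of B (single combined condition)
def findE_alt (totient e : Int) : Int :=
  if h : e < totient ∧ Int.gcd e totient ≠ 1 then findE_alt totient (e + 1)
  else e
termination_by (totient - e).toNat
decreasing_by omega

def generate_rsa_alt (p : Int) (q : Int) : Int × Int × Option Int :=
  let n := p * q
  let totient := (p - 1) * (q - 1)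
  let e := findE_alt totient 5
  let r := egcd e totient
  let d := if r.1 = 1 then some (PySem.Int.mod r.2.1 totient) else none
  (n, e, d)

-- ===== PRECONDITION & SPEC =====
def Spec_generate_rsa (p : Int) (q : Int) (out : Int × Int × Option Int) : Prop := out = generate_rsa_alt p q
instance (p : Int) (q : Int) (out : Int × Int × Option Int) : Decidable (Spec_generate_rsa p q out) := by unfold Spec_generate_rsa; infer_instance

-- ===== CLAIM (what is proved, stated in full; the proofs are below) =====
def Claim_equal_generate_rsa : Prop := ∀ (p : Int) (q : Int), Dom_generate_rsa p q → Spec_generate_rsa p q (generate_rsa p q)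

-- ===== LEMMAS AND PROOFS =====

-- the iterative loop from any coefficient state is the recursive egcd composed with that state
theorem extGcdLoop_eq_egcd (n : Nat) :
    ∀ a b s0 s1 t0 t1 : Int, b.natAbs ≤ n →
      extGcdLoop a b s0 s1 t0 t1 =
        ((egcd a b).1, s0 * (egcd a b).2.1 + s1 * (egcd a b).2.2,
          t0 * (egcd a b).2.1 + t1 * (egcd a b).2.2) := by
  induction n with
  | zero =>
    intro a b s0 s1 t0 t1 hb
    have hb0 : b = 0 := by omega
    subst hb0
    rw [extGcdLoop, egcd]
    simp
  | succ n ih =>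
    intro a b s0 s1 t0 t1 hb
    by_cases h : b = 0
    · subst h
      rw [extGcdLoop, egcd]
      simp
    · rw [extGcdLoop, egcd]
      simp only [h, dif_neg, not_false_iff]
      have hmeq : a - PySem.Int.floordiv a b * b = PySem.Int.mod a b := by
        have := PySem.Int.floordiv_mul_add_mod a b; omega
      have hlt : (PySem.Int.mod a b).natAbs ≤ n := by
        rcases lt_trichotomy b 0 with hbneg | hb0 | hbpos
        · have := PySem.Int.mod_neg_bounds a hbneg; omega
        · exact absurd hb0 h
        · have h1 := PySem.Int.mod_nonneg a hbpos
          have h2 := PySem.Int.mod_lt a hbpos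
          omega
      rw [hmeq, ih b (PySem.Int.mod a b) s1 (s0 - PySem.Int.floordiv a b * s1)
            t1 (t0 - PySem.Int.floordiv a b * t1) hlt]
      ring_nf

theorem extended_gcd_eq_egcd (a b : Int) : extended_gcd a b = egcd a b := by
  rw [extended_gcd, extGcdLoop_eq_egcd b.natAbs a b 1 0 0 1 le_rfl]
  ring_nf

theorem findE_eq_findE_alt (n : Nat) :
    ∀ totient e : Int, (totient - e).toNat ≤ n → findE totient e = findE_alt totient e := by
  induction n with
  | zero =>
    intro totient e hn
    rw [findE, findE_alt]
    have : ¬ e < totient := by omega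
    simp [this]
  | succ n ih =>
    intro totient e hn
    rw [findE, findE_alt]
    by_cases hlt : e < totient
    · by_cases hg : Int.gcd e totient = 1
      · simp [hlt, hg]
      · have : (totient - (e + 1)).toNat ≤ n := by omega
        simp [hlt, hg, ih totient (e + 1) this]
    · simp [hlt]

theorem generate_rsa_eq (p q : Int) : generate_rsa p q = generate_rsa_alt p q := by
  unfold generate_rsa generate_rsa_alt modular_inverse
  simp only [extended_gcd_eq_egcd,
    findE_eq_findE_alt ((p - 1) * (q - 1) - 5).toNat ((p - 1) * (q - 1)) 5 le_rfl]
  rcases hr : egcd (findE_alt ((p - 1) * (q - 1)) 5) ((p - 1) * (q - 1)) with ⟨g, x, y⟩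
  by_cases hg : g = 1 <;> simp [hr, hg]

-- ===== VERDICT (by name: the statement is the Claim_ definition above) =====
theorem generate_rsa_spec : Claim_equal_generate_rsa := by
  intro p q _
  unfold Spec_generate_rsa
  exact generate_rsa_eq p q
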